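-- pv_equiv track=rewrite | github.com/gm4slv/PythonProjects | SnargateCoastStation/dev/Raspi/dsc_functions.py | get_ecc
-- ===== SOURCE A (Python) =====
-- def get_ecc(f_s, a_s, c_s, s_s, tc1_s, tc2_s, d_s, e_s):
--
--     # if "All Ships", we ignore the a_mmsi word, it won't be transmitted, don't include it in the ECC
--     # this is done be setting it to "0"
--     if f_s != 116:
--         a_ecc = 0
--         # xor the 5 symbols of the TO mmsi together
--         for i in a_s:
--             a_ecc = int(i) ^ a_ecc
--     else:
--         a_ecc = 0
--
--     s_ecc = 0
--     # xor the 5 symbols of the FROM mmsi together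
--     for i in s_s:
--         s_ecc = int(i) ^ s_ecc
--
--     d_ecc = 0
--     # xor the 6 symbols of the "data" section together
--     for i in d_s:
--         d_ecc = int(i) ^ d_ecc
--     # the final ECC is done be XORing all the intermediate ECC values to the Format symbol and the EOS symbol.
--     ecc = f_s ^ a_ecc ^ c_s ^ s_ecc ^ tc1_s ^ tc2_s ^ d_ecc ^ e_s
--     return ecc
-- ===== SOURCE B (Python) =====
-- def _pairwise_xor(syms):
--     nxt = []
--     i = 0
--     while i + 1 < len(syms):
--         nxt.append(syms[i] ^ syms[i + 1])
--         i += 2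
--     if i < len(syms):
--         nxt.append(syms[i])
--     return nxt
--
-- def get_ecc(f_s, a_s, c_s, s_s, tc1_s, tc2_s, d_s, e_s):
--     syms = [f_s, c_s, tc1_s, tc2_s, e_s]
--     syms += [int(x) for x in s_s]
--     syms += [int(x) for x in d_s]
--     if f_s != 116:
--         syms += [int(x) for x in a_s]
--     # balanced tree reduction: XOR adjacent pairs until one value remains
--     while len(syms) > 1:
--         syms = _pairwise_xor(syms)
--     return syms[0]
-- ===== Notes on version B (the rewrite author's own statement) =====
-- stated objective: alternative
-- what changed: Replaces A's three sequential XOR-accumulator loops plus a wide final combine with a balanced tree reduction: one flat symbol list repeatedly halved by XORing adjacent pairs until a single value remains (correct because XOR is associative and commutative).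
import Mathlib
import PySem

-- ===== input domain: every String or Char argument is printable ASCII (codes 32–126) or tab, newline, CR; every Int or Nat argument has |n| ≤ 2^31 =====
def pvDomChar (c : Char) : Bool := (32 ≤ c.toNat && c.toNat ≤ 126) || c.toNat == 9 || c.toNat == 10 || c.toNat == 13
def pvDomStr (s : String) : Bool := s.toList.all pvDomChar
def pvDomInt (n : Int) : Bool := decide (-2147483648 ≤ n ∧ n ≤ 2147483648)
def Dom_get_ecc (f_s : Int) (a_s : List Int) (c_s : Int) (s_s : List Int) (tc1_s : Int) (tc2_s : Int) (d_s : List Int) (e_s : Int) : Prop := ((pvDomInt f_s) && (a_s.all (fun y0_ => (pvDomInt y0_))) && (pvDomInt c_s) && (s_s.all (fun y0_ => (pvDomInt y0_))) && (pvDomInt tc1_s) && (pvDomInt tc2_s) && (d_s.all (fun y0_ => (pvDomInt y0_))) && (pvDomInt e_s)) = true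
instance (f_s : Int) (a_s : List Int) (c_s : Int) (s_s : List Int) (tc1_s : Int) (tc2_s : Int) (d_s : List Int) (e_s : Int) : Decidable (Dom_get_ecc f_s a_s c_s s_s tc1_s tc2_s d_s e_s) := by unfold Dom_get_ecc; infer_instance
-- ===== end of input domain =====

-- B replaces A's three sequential XOR-accumulator loops and wide final combine with a
-- balanced tree reduction of one flat symbol list (XOR adjacent pairs until one remains);
-- alternative structure, same cost.

-- ===== PORT A =====
def get_ecc (f_s : Int) (a_s : List Int) (c_s : Int) (s_s : List Int) (tc1_s : Int) (tc2_s : Int) (d_s : List Int) (e_s : Int) : Int :=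
  let a_ecc := if f_s ≠ 116 then a_s.foldl (fun acc i => PySem.Int.bxor i acc) 0 else 0
  let s_ecc := s_s.foldl (fun acc i => PySem.Int.bxor i acc) 0
  let d_ecc := d_s.foldl (fun acc i => PySem.Int.bxor i acc) 0
  PySem.Int.bxor (PySem.Int.bxor (PySem.Int.bxor (PySem.Int.bxor (PySem.Int.bxor (PySem.Int.bxor (PySem.Int.bxor f_s a_ecc) c_s) s_ecc) tc1_s) tc2_s) d_ecc) e_s

-- ===== PORT B =====
-- _pairwise_xor: XOR adjacent pairs, keep a trailing unpaired element
def pvPairwiseXor : List Int → List Int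
  | [] => []
  | [x] => [x]
  | x :: y :: t => PySem.Int.bxor x y :: pvPairwiseXor t

theorem pvPairwiseXor_length_lt (x y : Int) (t : List Int) :
    (pvPairwiseXor (x :: y :: t)).length < (x :: y :: t).length := by
  induction t using pvPairwiseXor.induct generalizing x y with
  | case1 => simp [pvPairwiseXor]
  | case2 z => simp [pvPairwiseXor]
  | case3 z w t ih => simpa [pvPairwiseXor] using Nat.lt_add_right 1 (ih z w)

-- the while-loop: halve until at most one element remains
def pvTreeLoop (l : List Int) : List Int :=
  match l with
  | x :: y :: t => pvTreeLoop (pvPairwiseXor (x :: y :: t))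
  | l => l
termination_by l.length
decreasing_by exact pvPairwiseXor_length_lt x y t

def get_ecc_alt (f_s : Int) (a_s : List Int) (c_s : Int) (s_s : List Int) (tc1_s : Int) (tc2_s : Int) (d_s : List Int) (e_s : Int) : Int :=
  let syms := [f_s, c_s, tc1_s, tc2_s, e_s] ++ s_s ++ d_s
                ++ (if f_s ≠ 116 then a_s else [])
  -- syms is never empty (it starts with 5 scalars), so syms[0] exists
  (pvTreeLoop syms).headD 0

-- ===== PRECONDITION & SPEC =====
def Spec_get_ecc (f_s : Int) (a_s : List Int) (c_s : Int) (s_s : List Int) (tc1_s : Int) (tc2_s : Int) (d_s : List Int) (e_s : Int) (out : Int) : Prop := out = get_ecc_alt f_s a_s c_s s_s tc1_s tc2_s d_s e_s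
instance (f_s : Int) (a_s : List Int) (c_s : Int) (s_s : List Int) (tc1_s : Int) (tc2_s : Int) (d_s : List Int) (e_s : Int) (out : Int) : Decidable (Spec_get_ecc f_s a_s c_s s_s tc1_s tc2_s d_s e_s out) := by unfold Spec_get_ecc; infer_instance

-- ===== CLAIM (what is proved, stated in full; the proofs are below) =====
def Claim_equal_get_ecc : Prop := ∀ (f_s : Int) (a_s : List Int) (c_s : Int) (s_s : List Int) (tc1_s : Int) (tc2_s : Int) (d_s : List Int) (e_s : Int), Dom_get_ecc f_s a_s c_s s_s tc1_s tc2_s d_s e_s → Spec_get_ecc f_s a_s c_s s_s tc1_s tc2_s d_s e_s (get_ecc f_s a_s c_s s_s tc1_s tc2_s d_s e_s)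

-- ===== LEMMAS AND PROOFS =====

-- PySem's Python-exact xor agrees with core Int.xor
theorem bxor_eq_xor (a b : Int) : PySem.Int.bxor a b = Int.xor a b := by
  cases a <;> cases b <;> simp [PySem.Int.bxor, Int.xor] <;> omega

theorem bxor_assoc (a b c : Int) :
    PySem.Int.bxor (PySem.Int.bxor a b) c = PySem.Int.bxor a (PySem.Int.bxor b c) := by
  simp only [bxor_eq_xor]
  cases a <;> cases b <;> cases c <;> simp [Int.xor, Nat.xor_assoc]

theorem bxor_left_comm (a b c : Int) :
    PySem.Int.bxor a (PySem.Int.bxor b c) = PySem.Int.bxor b (PySem.Int.bxor a c) := by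
  rw [← bxor_assoc, PySem.Int.bxor_comm a b, bxor_assoc]

theorem zero_bxor (a : Int) : PySem.Int.bxor 0 a = a := by
  rw [PySem.Int.bxor_comm, PySem.Int.bxor_zero]

-- hoisting the seed out of an XOR foldl
theorem foldl_bxor_hoist (l : List Int) (x : Int) :
    l.foldl (fun acc y => PySem.Int.bxor acc y) x
      = PySem.Int.bxor x (l.foldl (fun acc y => PySem.Int.bxor acc y) 0) := by
  induction l generalizing x with
  | nil => simp [PySem.Int.bxor_zero]
  | cons h t ih =>
    simp only [List.foldl_cons]
    rw [ih (PySem.Int.bxor x h), ih (PySem.Int.bxor 0 h), zero_bxor, bxor_assoc]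

-- A folds symbol-XOR-acc; restated as acc-XOR-symbol
theorem foldl_bxor_flip (l : List Int) (x : Int) :
    l.foldl (fun acc y => PySem.Int.bxor y acc) x
      = l.foldl (fun acc y => PySem.Int.bxor acc y) x := by
  have : (fun (acc y : Int) => PySem.Int.bxor y acc) = fun acc y => PySem.Int.bxor acc y :=
    funext fun a => funext fun y => PySem.Int.bxor_comm y a
  rw [this]

-- pairing up preserves the XOR of the whole list
theorem foldl_pvPairwiseXor (l : List Int) (acc : Int) :
    (pvPairwiseXor l).foldl (fun a x => PySem.Int.bxor a x) acc
      = l.foldl (fun a x => PySem.Int.bxor a x) acc := by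
  induction l using pvPairwiseXor.induct generalizing acc with
  | case1 => rfl
  | case2 x => rfl
  | case3 x y t ih => simp only [pvPairwiseXor, List.foldl_cons, bxor_assoc, ih]

-- the tree loop computes the XOR fold of a nonempty list
theorem pvTreeLoop_headD (l : List Int) (h : l ≠ []) :
    (pvTreeLoop l).headD 0 = l.foldl (fun a x => PySem.Int.bxor a x) 0 := by
  induction l using pvTreeLoop.induct with
  | case1 x y t ih =>
    rw [pvTreeLoop]
    rw [ih (by simp [pvPairwiseXor]), foldl_pvPairwiseXor]
  | case2 l hl =>
    match l, h with
    | [x], _ => simp [pvTreeLoop, zero_bxor]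
    | [], h => exact absurd rfl h
    | x :: y :: t, _ => exact absurd rfl (hl x y t)

-- ===== VERDICT (by name: the statement is the Claim_ definition above) =====
theorem get_ecc_spec : Claim_equal_get_ecc := by
  intro f_s a_s c_s s_s tc1_s tc2_s d_s e_s _
  unfold Spec_get_ecc get_ecc get_ecc_alt
  rw [pvTreeLoop_headD _ (by simp)]
  simp only [List.foldl_append, foldl_bxor_flip]
  split_ifs with h
  · conv_rhs => rw [foldl_bxor_hoist a_s, foldl_bxor_hoist d_s, foldl_bxor_hoist s_s]
    simp [bxor_left_comm, PySem.Int.bxor_comm]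
  · conv_rhs => rw [foldl_bxor_hoist d_s, foldl_bxor_hoist s_s]
    simp [bxor_left_comm, PySem.Int.bxor_comm]
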